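-- pv_equiv track=rewrite | github.com/the-roth/HNAARGHBot | games/Jelly.py | item_pool_grammar_fix
-- ===== SOURCE A (Python) =====
-- def item_pool_grammar_fix(itemList):
-- 	s = ''
-- 	setList = [
-- 		i for i in sorted(set(itemList), key = itemList.index)
-- 		if i not in ['Ice Valk', 'Firebird', 'Zap', 'Thunder', 'Dragon', 'Fry']
-- 	]
-- 	if len(setList) == 0:
-- 		return 'Nothing!! Hahahahaha!'
-- 	if len(setList) == 1:
-- 		return setList[0] + '.'
-- 	for i in setList:
-- 		s = (s + (str(itemList.count(i)) + ' ' if itemList.count(i) > 1 else '')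
-- 			+ i
-- 			+ ('s, ' if itemList.count(i) > 1 else ', '))
-- 	if len(s) == 0:
-- 		return 'Nothing!! Hahahahaha!'
-- 	s = s[:-2] + '.'
-- 	s = s[:s.rfind(',')] + ' and' + s[s.rfind(',') + 1:]
-- 	return s
-- ===== SOURCE B (Python) =====
-- def item_pool_grammar_fix(itemList):
-- 	banned = ('Ice Valk', 'Firebird', 'Zap', 'Thunder', 'Dragon', 'Fry')
-- 	# one pass: ordered (item, count) pairs, first-occurrence order
-- 	pairs = []
-- 	for x in itemList:
-- 		for p in pairs:
-- 			if p[0] == x: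
-- 				p[1] += 1
-- 				break
-- 		else:
-- 			pairs.append([x, 1])
-- 	keep = [p for p in pairs if p[0] not in banned]
-- 	if len(keep) == 0:
-- 		return 'Nothing!! Hahahahaha!'
-- 	if len(keep) == 1:
-- 		return keep[0][0] + '.'
--
-- 	def fmt(p):
-- 		return str(p[1]) + ' ' + p[0] + 's' if p[1] > 1 else p[0]
--
-- 	# back-to-front assembly: seed with the final 'x and y.', prepend 'part, ' per step
-- 	out = fmt(keep[-2]) + ' and ' + fmt(keep[-1]) + '.'
-- 	for p in reversed(keep[:-2]):
-- 		out = fmt(p) + ', ' + out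
-- 	return out
-- ===== Notes on version B (the rewrite author's own statement) =====
-- stated objective: alternative
-- what changed: B replaces A's sorted(set(...), key=index) dedup plus three itemList.count scans per item and the accumulate/trim/rfind sentence surgery by a single pass that builds ordered (item,count) pairs and a back-to-front assembly that places ', ' / ' and ' / '.' directly, never editing a built string.
-- intended difference: On lists whose last distinct non-banned item contains a comma (with at least two kept items), A's rfind-based splice inserts ' and' at the comma inside that item's name (e.g. 'a, b andc.' for ['a','b,c']), while B returns 'a and b,c.' with the item name intact, which is the intended sentence. — e.g. on item_pool_grammar_fix(["a", "b,c"]): A returns "a, b andc.", B returns "a and b,c."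
import Mathlib
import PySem

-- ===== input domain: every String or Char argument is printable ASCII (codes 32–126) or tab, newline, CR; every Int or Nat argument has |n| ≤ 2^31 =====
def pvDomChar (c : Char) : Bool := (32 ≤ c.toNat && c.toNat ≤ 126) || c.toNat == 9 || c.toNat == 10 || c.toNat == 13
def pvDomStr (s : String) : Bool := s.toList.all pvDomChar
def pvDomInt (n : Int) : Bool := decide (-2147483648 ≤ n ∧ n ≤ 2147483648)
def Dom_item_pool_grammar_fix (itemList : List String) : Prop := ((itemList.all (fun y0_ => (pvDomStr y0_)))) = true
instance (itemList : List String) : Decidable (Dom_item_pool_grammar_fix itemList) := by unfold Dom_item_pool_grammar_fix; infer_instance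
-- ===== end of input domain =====

-- B builds the ordered (item, count) pairs in ONE pass over the list and assembles the
-- sentence recursively back-to-front (no sorted/set/index-key, no repeated count scans,
-- no join, no string trimming, no rfind).  Objective: alternative decomposition.

-- the excluded-item literal list, shared by both programs
def pvBanned : List String := ["Ice Valk", "Firebird", "Zap", "Thunder", "Dragon", "Fry"]

-- ===== PORT A =====
def item_pool_grammar_fix (itemList : List String) : String :=
  let setList := (PySem.List.sorted (PySem.Set.ofList itemList)
      (fun i => (PySem.List.index? itemList i).getD 0)).filter (fun i => !(pvBanned.contains i))
  if setList.length = 0 then "Nothing!! Hahahahaha!"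
  else if setList.length = 1 then setList.headI ++ "."
  else
    let s := setList.foldl (fun s i =>
      s ++ (if 1 < (PySem.List.count itemList i : Int) then
              PySem.Int.toStr (PySem.List.count itemList i) ++ " " else "")
        ++ i
        ++ (if 1 < (PySem.List.count itemList i : Int) then "s, " else ", ")) ""
    if PySem.Str.len s = 0 then "Nothing!! Hahahahaha!"
    else
      let s2 := PySem.Str.slice s none (some (-2)) ++ "."
      let r := PySem.Str.rfind s2 ","
      PySem.Str.slice s2 none (some r) ++ " and" ++ PySem.Str.slice s2 (some (r + 1)) none

-- ===== PORT B =====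
-- Source B's inner pairs loop: bump the count of x in place, or append [x, 1]
def pvUpd : List (String × Int) → String → List (String × Int)
  | [], x => [(x, 1)]
  | (y, c) :: t, x => if y = x then (y, c + 1) :: t else (y, c) :: pvUpd t x

-- Source B's fmt helper
def pvFmt (x : String) (c : Int) : String :=
  if 1 < c then PySem.Int.toStr c ++ " " ++ x ++ "s" else x

-- Source B's back-to-front assembly loop, as the equivalent structural recursion:
-- the two-element base is the seed 'x and y.', each step prepends 'part, '
def pvBuild : List (String × Int) → String
  | [p, q] => pvFmt p.1 p.2 ++ " and " ++ pvFmt q.1 q.2 ++ "."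
  | p :: rest => pvFmt p.1 p.2 ++ ", " ++ pvBuild rest
  | [] => ""

-- ', '.join of the last-less prefix, ' and ', last part, '.'

def item_pool_grammar_fix_alt (itemList : List String) : String :=
  let pairs := itemList.foldl pvUpd []
  let keep := pairs.filter (fun p => !(pvBanned.contains p.1))
  if keep.length = 0 then "Nothing!! Hahahahaha!"
  else if keep.length = 1 then keep.headI.1 ++ "."
  else pvBuild keep

-- ===== PRECONDITION & SPEC =====
-- On lists whose LAST distinct non-banned item contains a comma (and at least two items
-- are kept), A's rfind-based splice lands on the comma INSIDE that item's name and returns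
-- e.g. 'a, b andc.' for ['a','b,c'], while B returns 'a and b,c.' with the item name
-- intact, which is the intended sentence.  (Stated in closed form: some position k holds a
-- first occurrence of a non-banned comma-containing item, and no non-banned first
-- occurrence appears after k; plus two distinct non-banned items occur in the list.)
def D_item_pool_grammar_fix (itemList : List String) : Prop :=
  (∃ i < itemList.length, ∃ j < itemList.length,
      itemList.getD i "" ≠ itemList.getD j ""
      ∧ itemList.getD i "" ∉ pvBanned ∧ itemList.getD j "" ∉ pvBanned) ∧
  (∃ k < itemList.length,
      itemList.getD k "" ∉ pvBanned ∧ ',' ∈ (itemList.getD k "").toList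
      ∧ itemList.getD k "" ∉ itemList.take k
      ∧ ∀ j < itemList.length, k < j →
          (itemList.getD j "" ∈ pvBanned ∨ itemList.getD j "" ∈ itemList.take j))
instance (itemList : List String) : Decidable (D_item_pool_grammar_fix itemList) := by
  unfold D_item_pool_grammar_fix; infer_instance

def Spec_item_pool_grammar_fix (itemList : List String) (out : String) : Prop :=
  ¬ D_item_pool_grammar_fix itemList → out = item_pool_grammar_fix_alt itemList
instance (itemList : List String) (out : String) : Decidable (Spec_item_pool_grammar_fix itemList out) := by
  unfold Spec_item_pool_grammar_fix; infer_instance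

def pvDiffWitness_item_pool_grammar_fix : List String := ["a", "b,c"]
def pvDiffWitnessOut_item_pool_grammar_fix : String × String := ("a, b andc.", "a and b,c.")

-- ===== CLAIM (what is proved, stated in full; the proofs are below) =====
def Claim_unchanged_item_pool_grammar_fix : Prop := ∀ (itemList : List String), Dom_item_pool_grammar_fix itemList → Spec_item_pool_grammar_fix itemList (item_pool_grammar_fix itemList)
def Claim_changed_item_pool_grammar_fix : Prop := Dom_item_pool_grammar_fix (pvDiffWitness_item_pool_grammar_fix) ∧ D_item_pool_grammar_fix (pvDiffWitness_item_pool_grammar_fix) ∧ item_pool_grammar_fix (pvDiffWitness_item_pool_grammar_fix) = pvDiffWitnessOut_item_pool_grammar_fix.1 ∧ item_pool_grammar_fix_alt (pvDiffWitness_item_pool_grammar_fix) = pvDiffWitnessOut_item_pool_grammar_fix.2 ∧ pvDiffWitnessOut_item_pool_grammar_fix.1 ≠ pvDiffWitnessOut_item_pool_grammar_fix.2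

-- ===== LEMMAS AND PROOFS =====

-- the distinct non-banned items in first-occurrence order (proof-side abbreviation)
def pvKeepOf (itemList : List String) : List String :=
  (PySem.Set.ofList itemList).filter (fun i => !(pvBanned.contains i))

def pvPart (xs : List String) (i : String) : String :=
  pvFmt i (PySem.List.count xs i : Int)

-- A-side: the accumulator loop, one item's contribution

theorem pv_chunk (xs : List String) (i : String) :
    (if 1 < (PySem.List.count xs i : Int) then
        PySem.Int.toStr (PySem.List.count xs i) ++ " " else "").toList
      ++ i.toList
      ++ (if 1 < (PySem.List.count xs i : Int) then "s, " else ", ").toList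
    = (pvPart xs i).toList ++ [',', ' '] := by
  by_cases h : 1 < List.count i xs <;>
    simp [pvPart, pvFmt, PySem.List.count_eq, h]

theorem pv_foldl_toList (l : List String) (g₁ g₂ : String → String) (a : String) :
    (l.foldl (fun b x => b ++ g₁ x ++ x ++ g₂ x) a).toList
      = a.toList ++ l.flatMap (fun x => (g₁ x).toList ++ x.toList ++ (g₂ x).toList) := by
  induction l generalizing a with
  | nil => simp
  | cons x t ih => simp [ih]

theorem pv_flatMap_join (ps : List (List Char)) (sep : List Char) (h : ps ≠ []) :
    ps.flatMap (fun p => p ++ sep) = PySem.Chars.join sep ps ++ sep := by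
  induction ps with
  | nil => exact absurd rfl h
  | cons p t ih =>
    cases t with
    | nil => simp [PySem.Chars.join_singleton]
    | cons q r => simp [PySem.Chars.join_cons_cons, ih, List.flatMap_cons]

theorem pv_s_toList (xs ks : List String) :
    (ks.foldl (fun s i => s
        ++ (if 1 < (PySem.List.count xs i : Int) then
              PySem.Int.toStr (PySem.List.count xs i) ++ " " else "")
        ++ i
        ++ (if 1 < (PySem.List.count xs i : Int) then "s, " else ", ")) "").toList
      = (ks.map (fun i => (pvPart xs i).toList)).flatMap (fun p => p ++ [',', ' ']) := by
  rw [pv_foldl_toList]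
  have h1 : ks.flatMap (fun i =>
      (if 1 < (PySem.List.count xs i : Int) then
          PySem.Int.toStr (PySem.List.count xs i) ++ " " else "").toList
        ++ i.toList
        ++ (if 1 < (PySem.List.count xs i : Int) then "s, " else ", ").toList)
      = ks.flatMap (fun i => (pvPart xs i).toList ++ [',', ' ']) := by
    apply List.flatMap_congr
    intro x _
    exact pv_chunk xs x
  rw [h1]
  simp [List.flatMap_map]

theorem pv_slen (xs ks : List String) (hne : ks ≠ []) :
    ¬ (PySem.Str.len (ks.foldl (fun s i => s
        ++ (if 1 < (PySem.List.count xs i : Int) then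
              PySem.Int.toStr (PySem.List.count xs i) ++ " " else "")
        ++ i
        ++ (if 1 < (PySem.List.count xs i : Int) then "s, " else ", ")) "") = 0) := by
  rw [PySem.Str.len_eq, pv_s_toList xs ks]
  simp only [Int.natCast_eq_zero, List.length_eq_zero_iff]
  cases ks with
  | nil => exact absurd rfl hne
  | cons k t => simp [List.flatMap_cons]

theorem pv_body (xs ks : List String) (hks : ks ≠ []) :
    PySem.Str.slice (ks.foldl (fun s i => s
        ++ (if 1 < (PySem.List.count xs i : Int) then
              PySem.Int.toStr (PySem.List.count xs i) ++ " " else "")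
        ++ i
        ++ (if 1 < (PySem.List.count xs i : Int) then "s, " else ", ")) "") none (some (-2)) ++ "."
      = PySem.Str.join ", " (ks.map (pvPart xs)) ++ "." := by
  apply String.toList_inj.1
  simp only [String.toList_append, PySem.Str.toList_slice, PySem.Str.toList_join,
    PySem.Chars.slice_eq_listSlice]
  rw [pv_s_toList xs ks,
    pv_flatMap_join _ _ (by simpa using hks)]
  rw [PySem.List.slice_to_neg_ofNat _ 2 (by omega)]
  simp [List.map_map, Function.comp_def]

theorem pv_ofList_pairwise (xs : List String) :
    (PySem.Set.ofList xs).Pairwise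
      (fun a b => ((PySem.List.index? xs a).getD 0) < ((PySem.List.index? xs b).getD 0)) := by
  induction xs with
  | nil => simp [PySem.Set.ofList]
  | cons x t ih =>
    rw [PySem.Set.ofList_cons]
    constructor
    · intro b hb
      have hb' := (PySem.Set.mem_discard _ _ _).1 hb
      have hbx : b ≠ x := hb'.2
      have hbt : b ∈ t := (PySem.Set.mem_ofList _ _).1 hb'.1
      rw [PySem.List.index?_cons_self, PySem.List.index?_cons_of_ne _ (Ne.symm hbx)]
      rcases Option.isSome_iff_exists.1 ((PySem.List.index?_isSome_iff _ _).2 hbt) with ⟨k, hk⟩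
      rw [PySem.List.index?_eq_idxOf?] at hk
      simp [hk]
    · have hsub : List.Sublist ((PySem.Set.ofList t).discard x) (PySem.Set.ofList t) := by
        simp [PySem.Set.discard]
      have hp := ih.sublist hsub
      refine hp.imp_of_mem ?_
      intro a b ha hb h
      have hax : a ≠ x := ((PySem.Set.mem_discard _ _ _).1 ha).2
      have hbx : b ≠ x := ((PySem.Set.mem_discard _ _ _).1 hb).2
      have hat : a ∈ t := (PySem.Set.mem_ofList _ _).1 ((PySem.Set.mem_discard _ _ _).1 ha).1
      have hbt : b ∈ t := (PySem.Set.mem_ofList _ _).1 ((PySem.Set.mem_discard _ _ _).1 hb).1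
      rw [PySem.List.index?_cons_of_ne _ (Ne.symm hax), PySem.List.index?_cons_of_ne _ (Ne.symm hbx)]
      rcases Option.isSome_iff_exists.1 ((PySem.List.index?_isSome_iff _ _).2 hat) with ⟨j, hj⟩
      rcases Option.isSome_iff_exists.1 ((PySem.List.index?_isSome_iff _ _).2 hbt) with ⟨k, hk⟩
      rw [hj, hk] at h ⊢
      simpa using h

theorem pv_sorted_ofList (xs : List String) :
    PySem.List.sorted (PySem.Set.ofList xs) (fun i => (PySem.List.index? xs i).getD 0)
      = PySem.Set.ofList xs := by
  exact PySem.List.sorted_eq_self_of_pairwise _ _ ((pv_ofList_pairwise xs).imp le_of_lt)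

-- rfind characterization
theorem pv_rfind_go (s sub : List Char) (p : Nat) :
    ∀ k, p ≤ k → sub.isPrefixOf (s.drop p) = true →
      (∀ j, p < j → j ≤ k → sub.isPrefixOf (s.drop j) = false) →
      PySem.Chars.rfind.go s sub k = (p : Int) := by
  intro k
  induction k with
  | zero =>
    intro hpk hp _
    interval_cases p
    simp [PySem.Chars.rfind.go] at hp ⊢
    simp [hp]
  | succ k ih =>
    intro hpk hp hh
    by_cases hpe : p = k + 1
    · subst hpe
      simp [PySem.Chars.rfind.go, hp]
    · have hpk' : p ≤ k := by omega
      have hfalse := hh (k+1) (by omega) le_rfl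
      simp [PySem.Chars.rfind.go, hfalse]
      exact ih hpk' hp (fun j h1 h2 => hh j h1 (by omega))

theorem pv_isPrefixOf_single_mem {c : Char} {l : List Char} (h : [c].isPrefixOf l = true) : c ∈ l := by
  cases l with
  | nil => simp [List.isPrefixOf] at h
  | cons a t =>
    simp [List.isPrefixOf] at h
    simp [h]

theorem pv_rfind_last (P T : List Char) (hT : ',' ∉ T) :
    PySem.Chars.rfind (P ++ ',' :: T) [','] = (P.length : Int) := by
  unfold PySem.Chars.rfind
  apply pv_rfind_go
  · simp
  · simp [List.isPrefixOf]
  · intro j h1 h2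
    by_contra hfa
    have hpre : [','].isPrefixOf ((P ++ ',' :: T).drop j) = true := by
      revert hfa; cases h : [','].isPrefixOf ((P ++ ',' :: T).drop j) <;> simp
    have hmem : ',' ∈ (P ++ ',' :: T).drop j := pv_isPrefixOf_single_mem hpre
    have : (P ++ ',' :: T).drop j = T.drop (j - P.length - 1) := by
      have hj : j = P.length + 1 + (j - P.length - 1) := by omega
      rw [hj]
      rw [show P ++ ',' :: T = (P ++ [',']) ++ T by simp]
      rw [show P.length + 1 + (j - P.length - 1) = (P ++ [',']).length + (j - P.length - 1) by simp]
      rw [List.drop_append]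
      rw [List.drop_of_length_le (by simp)]
      simp
      omega
    rw [this] at hmem
    exact hT (List.mem_of_mem_drop hmem)

theorem pvUpd_not_mem (acc : List (String × Int)) (x : String)
    (h : x ∉ acc.map Prod.fst) : pvUpd acc x = acc ++ [(x, 1)] := by
  induction acc with
  | nil => rfl
  | cons p t ih =>
    obtain ⟨y, c⟩ := p
    have hyx : y ≠ x := fun he => h (by simp [he])
    have ht : x ∉ t.map Prod.fst := fun hm => h (by simp [hm])
    simp [pvUpd, hyx, ih ht]

theorem pvUpd_mem (acc : List (String × Int)) (x : String)
    (hnd : (acc.map Prod.fst).Nodup) (h : x ∈ acc.map Prod.fst) :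
    pvUpd acc x = acc.map (fun p => if p.1 = x then (p.1, p.2 + 1) else p) := by
  induction acc with
  | nil => simp at h
  | cons p t ih =>
    obtain ⟨y, c⟩ := p
    rw [List.map_cons, List.nodup_cons] at hnd
    by_cases hyx : y = x
    · subst hyx
      have ht : ∀ p ∈ t, (if p.1 = y then (p.1, p.2 + 1) else p) = p := by
        intro p hp
        have hm : p.1 ∈ t.map Prod.fst := List.mem_map_of_mem hp
        have : p.1 ≠ y := fun he => hnd.1 (he ▸ hm)
        simp [this]
      simp [pvUpd, List.map_congr_left ht]
    · have hxt : x ∈ t.map Prod.fst := by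
        rw [List.map_cons] at h
        rcases List.mem_cons.1 h with h' | h'
        · exact absurd h'.symm hyx
        · exact h'
      simp [pvUpd, hyx, ih hnd.2 hxt]


theorem pv_map_filter_congr {α β : Type} (l : List α) {p q : α → Bool} {f g : α → β}
    (hpq : ∀ a ∈ l, p a = q a) (hfg : ∀ a, q a = true → f a = g a) :
    (l.filter p).map f = (l.filter q).map g := by
  rw [List.filter_congr hpq]
  apply List.map_congr_left
  intro a ha
  exact hfg a (List.mem_filter.1 ha).2

theorem pv_foldl_pvUpd (xs : List String) : ∀ (acc : List (String × Int)),
    (acc.map Prod.fst).Nodup →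
    xs.foldl pvUpd acc
      = acc.map (fun p => (p.1, p.2 + (xs.count p.1 : Int)))
        ++ ((PySem.Set.ofList xs).filter (fun x => !((acc.map Prod.fst).contains x))).map
             (fun x => (x, (xs.count x : Int))) := by
  induction xs with
  | nil =>
    intro acc _
    simp [PySem.Set.ofList]
  | cons x xs ih =>
    intro acc hnd
    rw [List.foldl_cons]
    by_cases hx : x ∈ acc.map Prod.fst
    · rw [pvUpd_mem acc x hnd hx]
      have hkeys : (acc.map (fun p => if p.1 = x then (p.1, p.2 + 1) else p)).map Prod.fst
          = acc.map Prod.fst := by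
        rw [List.map_map]; apply List.map_congr_left; intro p _; by_cases h : p.1 = x <;> simp [h]
      rw [ih _ (by rw [hkeys]; exact hnd)]
      rw [hkeys]
      congr 1
      · rw [List.map_map]
        apply List.map_congr_left
        intro p _
        by_cases h : p.1 = x
        · simp [h, List.count_cons]
          push_cast
          ring
        · simp [h, Ne.symm h]
      · rw [PySem.Set.ofList_cons]
        have hxf : (!((acc.map Prod.fst).contains x)) = false := by simp [hx]
        rw [List.filter_cons, hxf]
        simp only [Bool.false_eq_true, if_false, PySem.Set.discard]
        rw [List.filter_filter]
        apply pv_map_filter_congr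
        · intro y _
          by_cases hy : y = x
          · subst hy; simp [hx]
          · simp [hy]
        · intro y hq
          have : y ≠ x := by
            intro he
            subst he
            simp [hx] at hq
          simp [List.count_cons, Ne.symm this]
    · rw [pvUpd_not_mem acc x hx]
      have hkeys : ((acc ++ [(x, 1)]).map Prod.fst) = acc.map Prod.fst ++ [x] := by simp
      have hnd' : ((acc ++ [(x, 1)]).map Prod.fst).Nodup := by
        rw [hkeys]
        refine List.Nodup.append hnd (List.nodup_singleton x) ?_
        intro a ha hb
        simp at hb
        subst hb
        exact hx ha
      rw [ih _ hnd', hkeys]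
      rw [PySem.Set.ofList_cons]
      have hxf : (!((acc.map Prod.fst).contains x)) = true := by simp [hx]
      rw [List.filter_cons, hxf, if_pos rfl]
      simp only [PySem.Set.discard]
      rw [List.filter_filter]
      rw [List.map_append, List.append_assoc]
      congr 1
      · apply List.map_congr_left
        intro p hp
        have hm : p.1 ∈ acc.map Prod.fst := List.mem_map_of_mem hp
        have : p.1 ≠ x := fun he => hx (he ▸ hm)
        simp [List.count_cons, Ne.symm this]
      · simp only [List.map_cons, List.cons_append, List.nil_append]
        congr 1
        · simp [List.count_cons]
          push_cast
          ring
        · apply pv_map_filter_congr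
          · intro y _
            by_cases hy : y = x
            · subst hy; simp
            · simp only [List.contains_append]
              simp [hy, Ne.symm hy]
          · intro y hq
            have : y ≠ x := by
              intro he
              subst he
              simp at hq
            simp [List.count_cons, Ne.symm this]

theorem pv_pairs_eq (xs : List String) :
    xs.foldl pvUpd [] = (PySem.Set.ofList xs).map (fun x => (x, (xs.count x : Int))) := by
  rw [pv_foldl_pvUpd xs [] (by simp)]
  simp


theorem pv_build_eq (z : String × Int) : ∀ (rest : List (String × Int)) (p : String × Int),
    (pvBuild (p :: rest ++ [z])).toList
      = PySem.Chars.join [',', ' '] ((p :: rest).map (fun r => (pvFmt r.1 r.2).toList))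
        ++ (" and ".toList ++ (pvFmt z.1 z.2).toList ++ ['.']) := by
  intro rest
  induction rest with
  | nil =>
    intro p
    simp [pvBuild, PySem.Chars.join_singleton]
  | cons q t ih =>
    intro p
    rw [show p :: (q :: t) ++ [z] = p :: (q :: (t ++ [z])) by simp]
    rw [show pvBuild (p :: q :: (t ++ [z])) = pvFmt p.1 p.2 ++ ", " ++ pvBuild (q :: (t ++ [z])) from ?_]
    · rw [List.map_cons, List.map_cons, PySem.Chars.join_cons_cons]
      rw [show (pvFmt q.1 q.2).toList :: List.map (fun r => (pvFmt r.1 r.2).toList) t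
            = List.map (fun r => (pvFmt r.1 r.2).toList) (q :: t) by rw [List.map_cons]]
      simp only [String.toList_append]
      rw [show q :: (t ++ [z]) = q :: t ++ [z] by simp]
      rw [ih q]
      simp
    · cases h : t ++ [z] with
      | nil => simp at h
      | cons a u => simp [pvBuild]

theorem pv_join_concat (sep : List Char) (b : List Char) :
    ∀ (as_ : List (List Char)), as_ ≠ [] →
    PySem.Chars.join sep (as_ ++ [b]) = PySem.Chars.join sep as_ ++ sep ++ b := by
  intro as_
  induction as_ with
  | nil => intro h; exact absurd rfl h
  | cons a t ih =>
    intro _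
    cases t with
    | nil => simp [PySem.Chars.join_cons_cons, PySem.Chars.join_singleton]
    | cons c u =>
      rw [show (a :: c :: u) ++ [b] = a :: ((c :: u) ++ [b]) by simp]
      rw [show (c :: u) ++ [b] = c :: (u ++ [b]) by simp]
      rw [PySem.Chars.join_cons_cons]
      rw [show c :: (u ++ [b]) = (c :: u) ++ [b] by simp]
      rw [ih (by simp)]
      rw [PySem.Chars.join_cons_cons]
      simp

set_option maxHeartbeats 1000000 in
theorem pv_digitChar_ne_comma (n : Nat) : Nat.digitChar n ≠ ',' := by
  rcases Nat.lt_or_ge n 16 with h | h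
  · interval_cases n <;> decide
  · unfold Nat.digitChar
    repeat rw [if_neg (by omega)]
    decide

theorem pv_toDigitsCore_no_comma (b : Nat) : ∀ (f n : Nat) (acc : List Char),
    ',' ∉ acc → ',' ∉ Nat.toDigitsCore b f n acc := by
  intro f
  induction f with
  | zero => intro n acc h; simpa [Nat.toDigitsCore] using h
  | succ f ih =>
    intro n acc h
    rw [Nat.toDigitsCore]
    split
    · intro hc
      rcases List.mem_cons.1 hc with hc | hc
      · exact pv_digitChar_ne_comma _ hc.symm
      · exact h hc
    · apply ih
      intro hc
      rcases List.mem_cons.1 hc with hc | hc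
      · exact pv_digitChar_ne_comma _ hc.symm
      · exact h hc

theorem pv_toChars_no_comma (n : Int) (hn : 0 ≤ n) : ',' ∉ PySem.Int.toChars n := by
  unfold PySem.Int.toChars
  rw [if_neg (by omega)]
  exact pv_toDigitsCore_no_comma 10 _ _ [] (by simp)

theorem pv_part_no_comma (xs : List String) (z : String) (hz : ',' ∉ z.toList) :
    ',' ∉ (pvPart xs z).toList := by
  unfold pvPart pvFmt
  split
  · intro hmem
    simp only [String.toList_append, List.mem_append, PySem.Int.toList_toStr] at hmem
    rcases hmem with ((hc | hc) | hc) | hc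
    · exact pv_toChars_no_comma _ (by positivity) hc
    · simp at hc
    · exact hz hc
    · simp at hc
  · exact hz

theorem pv_final (xs ks : List String) (h2 : 2 ≤ ks.length)
    (hcomma : ',' ∉ (ks.getLastD "").toList) :
    (let s := ks.foldl (fun s i => s
        ++ (if 1 < (PySem.List.count xs i : Int) then
              PySem.Int.toStr (PySem.List.count xs i) ++ " " else "")
        ++ i
        ++ (if 1 < (PySem.List.count xs i : Int) then "s, " else ", ")) ""
    if PySem.Str.len s = 0 then "Nothing!! Hahahahaha!"
    else
      let s2 := PySem.Str.slice s none (some (-2)) ++ "."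
      let r := PySem.Str.rfind s2 ","
      PySem.Str.slice s2 none (some r) ++ " and" ++ PySem.Str.slice s2 (some (r + 1)) none)
    = pvBuild (ks.map (fun x => (x, (PySem.List.count xs x : Int)))) := by
  have hne : ks ≠ [] := by intro h; rw [h] at h2; simp at h2
  simp only
  rw [if_neg (pv_slen xs ks hne)]
  rw [pv_body xs ks hne]
  -- decompose ks = (q :: qt) ++ [z]
  obtain ⟨z, ks', hz⟩ : ∃ z ks', ks = ks' ++ [z] := by
    rcases List.eq_nil_or_concat ks with h | ⟨ks', z, h⟩
    · exact absurd h hne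
    · exact ⟨z, ks', by simpa [List.concat_eq_append] using h⟩
  obtain ⟨q, qt, hq⟩ : ∃ q qt, ks' = q :: qt := by
    cases ks' with
    | nil => rw [hz] at h2; simp at h2
    | cons q qt => exact ⟨q, qt, rfl⟩
  subst hq
  subst hz
  have hlast : ((q :: qt) ++ [z]).getLastD "" = z := by
    rw [List.getLastD_concat]
  rw [hlast] at hcomma
  -- character-level forms
  have hS2 : (PySem.Str.join ", " (((q :: qt) ++ [z]).map (pvPart xs))).toList ++ ".".toList
      = PySem.Chars.join [',', ' '] ((q :: qt).map (fun i => (pvPart xs i).toList))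
        ++ ',' :: (' ' :: ((pvPart xs z).toList ++ ['.'])) := by
    rw [PySem.Str.toList_join]
    rw [List.map_append, List.map_append]
    simp only [List.map_cons, List.map_nil]
    rw [pv_join_concat _ _ _ (by simp)]
    rw [show (", ".toList : List Char) = [',', ' '] from rfl]
    rw [show (".".toList : List Char) = ['.'] from rfl]
    simp [List.map_map, Function.comp_def]
  have hT : ',' ∉ (' ' :: ((pvPart xs z).toList ++ ['.'])) := by
    intro h
    rcases List.mem_cons.1 h with h | h
    · simp at h
    · rcases List.mem_append.1 h with h | h
      · exact pv_part_no_comma xs z hcomma h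
      · simp at h
  have hr : PySem.Str.rfind (PySem.Str.join ", " (((q :: qt) ++ [z]).map (pvPart xs)) ++ ".") ","
      = ((PySem.Chars.join [',', ' '] ((q :: qt).map (fun i => (pvPart xs i).toList))).length : Int) := by
    rw [PySem.Str.rfind_eq, String.toList_append, hS2]
    rw [show (",".toList : List Char) = [','] from rfl]
    exact pv_rfind_last _ _ hT
  rw [hr]
  apply String.toList_inj.1
  rw [show ((q :: qt) ++ [z]).map (fun x => (x, (PySem.List.count xs x : Int)))
      = ((q, (PySem.List.count xs q : Int))
          :: qt.map (fun x => (x, (PySem.List.count xs x : Int)))) ++ [(z, (PySem.List.count xs z : Int))] by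
    simp]
  rw [pv_build_eq]
  simp only [String.toList_append, PySem.Str.toList_slice, PySem.Chars.slice_eq_listSlice]
  rw [hS2]
  rw [PySem.List.slice_to_natCast]
  rw [show ((PySem.Chars.join [',', ' '] ((q :: qt).map (fun i => (pvPart xs i).toList))).length : Int) + 1
      = (((PySem.Chars.join [',', ' '] ((q :: qt).map (fun i => (pvPart xs i).toList))).length + 1 : Nat) : Int) by
    push_cast; ring]
  rw [PySem.List.slice_from_natCast]
  rw [List.take_left, List.drop_append]
  simp only [List.map_cons, List.map_map]
  have hmapeq : qt.map ((fun r : String × Int => (pvFmt r.1 r.2).toList)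
        ∘ (fun x => (x, (PySem.List.count xs x : Int))))
      = qt.map (fun i => (pvPart xs i).toList) := by
    apply List.map_congr_left
    intro a _
    rfl
  rw [hmapeq]
  simp [pvPart]

theorem pv_keep_eq (xs : List String) :
    (xs.foldl pvUpd []).filter (fun p => !(pvBanned.contains p.1))
      = (pvKeepOf xs).map (fun x => (x, (PySem.List.count xs x : Int))) := by
  rw [pv_pairs_eq]
  have h : (PySem.Set.ofList xs).map (fun x => (x, (xs.count x : Int)))
      = (PySem.Set.ofList xs).map (fun x => (x, (PySem.List.count xs x : Int))) := by
    apply List.map_congr_left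
    intro a _
    simp [PySem.List.count_eq]
  rw [h, List.filter_map]
  unfold pvKeepOf
  congr 1

-- membership in the kept list
theorem pv_mem_keep (xs : List String) (y : String) :
    y ∈ pvKeepOf xs ↔ y ∈ xs ∧ y ∉ pvBanned := by
  unfold pvKeepOf
  rw [List.mem_filter, PySem.Set.mem_ofList]
  simp

theorem pv_keep_nodup (xs : List String) : (pvKeepOf xs).Nodup :=
  (PySem.Set.nodup_ofList xs).filter _

theorem pv_idx_getD (xs : List String) (a : String) (ha : a ∈ xs) :
    (PySem.List.index? xs a).getD 0 = xs.idxOf a := by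
  rw [PySem.List.index?_eq_idxOf?]
  rcases Option.isSome_iff_exists.1 (List.isSome_idxOf?.2 ha) with ⟨k, hk⟩
  rw [List.idxOf_eq_getD_idxOf?, hk]
  rfl

theorem pv_keep_pairwise (xs : List String) :
    (pvKeepOf xs).Pairwise (fun a b => xs.idxOf a < xs.idxOf b) := by
  have h : (pvKeepOf xs).Pairwise
      (fun a b => ((PySem.List.index? xs a).getD 0) < ((PySem.List.index? xs b).getD 0)) :=
    (pv_ofList_pairwise xs).sublist List.filter_sublist
  refine h.imp_of_mem ?_
  intro a b ha hb hr
  have ha' : a ∈ xs := ((pv_mem_keep xs a).1 ha).1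
  have hb' : b ∈ xs := ((pv_mem_keep xs b).1 hb).1
  rwa [pv_idx_getD xs a ha', pv_idx_getD xs b hb'] at hr

-- in a strictly increasing list the last element is maximal
theorem pv_pairwise_getLast {α : Type} (r : α → α → Prop) :
    ∀ (l : List α) (h : l ≠ []), l.Pairwise r → ∀ a ∈ l, a = l.getLast h ∨ r a (l.getLast h) := by
  intro l
  induction l with
  | nil => intro h; exact absurd rfl h
  | cons x t ih =>
    intro _ hp a ha
    cases t with
    | nil =>
      left
      simpa using ha
    | cons y u =>
      rw [List.getLast_cons (by simp)]
      rcases List.mem_cons.1 ha with h' | h'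
      · right
        subst h'
        exact (List.pairwise_cons.1 hp).1 _ (List.getLast_mem _)
      · exact ih (by simp) (List.pairwise_cons.1 hp).2 a h'

theorem pv_two_le_length {α : Type} {l : List α} {a b : α}
    (ha : a ∈ l) (hb : b ∈ l) (hab : a ≠ b) : 2 ≤ l.length := by
  cases l with
  | nil => simp at ha
  | cons x t =>
    cases t with
    | nil =>
      simp at ha hb
      exact absurd (ha.trans hb.symm) hab
    | cons y u => simp [Nat.succ_le_succ]

theorem pv_getD_mem (xs : List String) (i : Nat) (hi : i < xs.length) :
    xs.getD i "" ∈ xs := by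
  rw [List.getD_eq_getElem xs "" hi]
  exact List.getElem_mem hi

theorem pv_D_iff (xs : List String) :
    D_item_pool_grammar_fix xs ↔
      (2 ≤ (pvKeepOf xs).length ∧ ',' ∈ ((pvKeepOf xs).getLastD "").toList) := by
  have hnd := pv_keep_nodup xs
  have hpair := pv_keep_pairwise xs
  constructor
  · rintro ⟨⟨i, hi, j, hj, hne, hib, hjb⟩, ⟨k, hk, hkb, hkc, hkf, hlastk⟩⟩
    have hiks : xs.getD i "" ∈ pvKeepOf xs := (pv_mem_keep xs _).2 ⟨pv_getD_mem xs i hi, hib⟩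
    have hjks : xs.getD j "" ∈ pvKeepOf xs := (pv_mem_keep xs _).2 ⟨pv_getD_mem xs j hj, hjb⟩
    have h2 : 2 ≤ (pvKeepOf xs).length := pv_two_le_length hiks hjks hne
    have hne' : pvKeepOf xs ≠ [] := by
      intro h; rw [h] at h2; simp at h2
    -- the witness item is the last kept one
    have hxmem : xs.getD k "" ∈ xs := pv_getD_mem xs k hk
    have hxks : xs.getD k "" ∈ pvKeepOf xs := (pv_mem_keep xs _).2 ⟨hxmem, hkb⟩
    set L := (pvKeepOf xs).getLast hne' with hL
    have hLks : L ∈ pvKeepOf xs := List.getLast_mem hne'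
    have hLxs : L ∈ xs := ((pv_mem_keep xs L).1 hLks).1
    have hLkept : L ∉ pvBanned := ((pv_mem_keep xs L).1 hLks).2
    have hidxk : xs.idxOf (xs.getD k "") = k := by
      have hle : xs.idxOf (xs.getD k "") ≤ k := by
        have : xs.getD k "" ∈ xs.take (k + 1) := by
          rw [List.mem_take_iff_getElem]
          exact ⟨k, by omega, (List.getD_eq_getElem xs "" hk).symm⟩
        have := (List.mem_take_iff_idxOf_lt hxmem).1 this
        omega
      have hge : ¬ (xs.idxOf (xs.getD k "") < k) := by
        intro hlt
        exact hkf ((List.mem_take_iff_idxOf_lt hxmem).2 hlt)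
      omega
    have hxL : xs.getD k "" = L := by
      rcases pv_pairwise_getLast _ (pvKeepOf xs) hne' hpair _ hxks with h | h
      · exact h
      · exfalso
        have hjL : xs.idxOf L < xs.length := List.idxOf_lt_length_iff.2 hLxs
        have hkj : k < xs.idxOf L := by rw [hidxk] at h; exact h
        have hgdL : xs.getD (xs.idxOf L) "" = L := by
          rw [List.getD_eq_getElem xs "" hjL]
          exact List.getElem_idxOf hjL
        rcases hlastk (xs.idxOf L) hjL hkj with hc | hc
        · rw [hgdL] at hc; exact hLkept hc
        · rw [hgdL] at hc
          have := (List.mem_take_iff_idxOf_lt hLxs).1 hc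
          omega
    refine ⟨h2, ?_⟩
    have hgl : (pvKeepOf xs).getLastD "" = L := by
      rw [List.getLastD_eq_getLast?, List.getLast?_eq_some_getLast hne']
      rfl
    rw [hgl, ← hxL]
    exact hkc
  · rintro ⟨h2, hc⟩
    have hne' : pvKeepOf xs ≠ [] := by
      intro h; rw [h] at h2; simp at h2
    set L := (pvKeepOf xs).getLast hne' with hL
    have hgl : (pvKeepOf xs).getLastD "" = L := by
      rw [List.getLastD_eq_getLast?, List.getLast?_eq_some_getLast hne']
      rfl
    rw [hgl] at hc
    have hLks : L ∈ pvKeepOf xs := List.getLast_mem hne'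
    have hLxs : L ∈ xs := ((pv_mem_keep xs L).1 hLks).1
    have hLkept : L ∉ pvBanned := ((pv_mem_keep xs L).1 hLks).2
    have hkL : xs.idxOf L < xs.length := List.idxOf_lt_length_iff.2 hLxs
    have hgdL : xs.getD (xs.idxOf L) "" = L := by
      rw [List.getD_eq_getElem xs "" hkL]
      exact List.getElem_idxOf hkL
    constructor
    · -- two distinct kept items
      obtain ⟨c1, t, ht⟩ : ∃ c1 t, pvKeepOf xs = c1 :: t := by
        cases h : pvKeepOf xs with
        | nil => rw [h] at h2; simp at h2
        | cons c1 t => exact ⟨c1, t, rfl⟩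
      obtain ⟨c2, u, hu⟩ : ∃ c2 u, t = c2 :: u := by
        cases h : t with
        | nil => rw [ht, h] at h2; simp at h2
        | cons c2 u => exact ⟨c2, u, rfl⟩
      have hc1 : c1 ∈ pvKeepOf xs := by rw [ht]; simp
      have hc2 : c2 ∈ pvKeepOf xs := by rw [ht, hu]; simp
      have hc12 : c1 ≠ c2 := by
        rw [ht, hu] at hnd
        rcases List.nodup_cons.1 hnd with ⟨hn, _⟩
        intro he
        exact hn (he ▸ (by simp))
      have h1xs : c1 ∈ xs := ((pv_mem_keep xs c1).1 hc1).1
      have h2xs : c2 ∈ xs := ((pv_mem_keep xs c2).1 hc2).1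
      refine ⟨xs.idxOf c1, List.idxOf_lt_length_iff.2 h1xs,
              xs.idxOf c2, List.idxOf_lt_length_iff.2 h2xs, ?_, ?_, ?_⟩
      · rw [List.getD_eq_getElem xs "" (List.idxOf_lt_length_iff.2 h1xs),
            List.getD_eq_getElem xs "" (List.idxOf_lt_length_iff.2 h2xs),
            List.getElem_idxOf, List.getElem_idxOf]
        exact hc12
      · rw [List.getD_eq_getElem xs "" (List.idxOf_lt_length_iff.2 h1xs), List.getElem_idxOf]
        exact ((pv_mem_keep xs c1).1 hc1).2
      · rw [List.getD_eq_getElem xs "" (List.idxOf_lt_length_iff.2 h2xs), List.getElem_idxOf]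
        exact ((pv_mem_keep xs c2).1 hc2).2
    · refine ⟨xs.idxOf L, hkL, ?_, ?_, ?_, ?_⟩
      · rw [hgdL]; exact hLkept
      · rw [hgdL]; exact hc
      · rw [hgdL]
        intro hmem
        have := (List.mem_take_iff_idxOf_lt hLxs).1 hmem
        omega
      · intro j hj hkj
        by_contra hcon
        push_neg at hcon
        obtain ⟨hnb, hnt⟩ := hcon
        have hyxs : xs.getD j "" ∈ xs := pv_getD_mem xs j hj
        have hyks : xs.getD j "" ∈ pvKeepOf xs := (pv_mem_keep xs _).2 ⟨hyxs, hnb⟩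
        have hjy : j ≤ xs.idxOf (xs.getD j "") := by
          by_contra hlt
          push_neg at hlt
          exact hnt ((List.mem_take_iff_idxOf_lt hyxs).2 hlt)
        rcases pv_pairwise_getLast _ (pvKeepOf xs) hne' hpair _ hyks with h | h
        · rw [h, ← hL] at hjy
          omega
        · rw [← hL] at h
          omega

theorem pv_main (xs : List String) (hD : ¬ D_item_pool_grammar_fix xs) :
    item_pool_grammar_fix xs = item_pool_grammar_fix_alt xs := by
  unfold item_pool_grammar_fix item_pool_grammar_fix_alt
  dsimp only
  rw [pv_sorted_ofList, pv_keep_eq]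
  simp only [List.length_map]
  by_cases h0 : (pvKeepOf xs).length = 0
  · rw [show (PySem.Set.ofList xs).filter (fun i => !(pvBanned.contains i)) = pvKeepOf xs from rfl]
    rw [if_pos h0, if_pos h0]
  rw [show (PySem.Set.ofList xs).filter (fun i => !(pvBanned.contains i)) = pvKeepOf xs from rfl]
  rw [if_neg h0, if_neg h0]
  by_cases h1 : (pvKeepOf xs).length = 1
  · rw [if_pos h1, if_pos h1]
    obtain ⟨k, hk⟩ := List.length_eq_one_iff.1 h1
    rw [hk]
    simp
  rw [if_neg h1, if_neg h1]
  have h2 : 2 ≤ (pvKeepOf xs).length := by omega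
  have hcomma : ',' ∉ ((pvKeepOf xs).getLastD "").toList := by
    intro hmem
    exact hD ((pv_D_iff xs).mpr ⟨h2, hmem⟩)
  exact pv_final xs (pvKeepOf xs) h2 hcomma

-- ===== VERDICT (by name: the statement is the Claim_ definition above) =====
theorem item_pool_grammar_fix_spec : Claim_unchanged_item_pool_grammar_fix := by
  intro itemList _
  unfold Spec_item_pool_grammar_fix
  intro hD
  exact pv_main itemList hD

theorem item_pool_grammar_fix_changed : Claim_changed_item_pool_grammar_fix := by
  unfold Claim_changed_item_pool_grammar_fix; decide
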